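-- pv_equiv track=rewrite | github.com/drizztSun/common_project | PythonLeetcode/leetcodeM/1391_CheckIfThereIsValidPathInGrid.py | doit_disjoint
-- ===== SOURCE A (Python) =====
-- def doit_disjoint(grid: list) -> bool:
--     m, n = len(grid), len(grid[0])
--     uf = {(i, j): (i, j) for i in range(-1, 2 * m) for j in range(-1, 2 * n)}
--
--     def find(x):
--         while (x) != uf[x]:
--             uf[x] = uf[uf[x]]
--             x = uf[x]
--         return x
--
--     def merge(x, y, dx, dy):
--         uf[find((x, y))] = uf[find((x + dx, y + dy))]
--
--     for i in range(m):
--         for j in range(n):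
--             if grid[i][j] in (2, 5, 6): merge(i*2, j*2, -1, 0)
--             if grid[i][j] in (2, 3, 4): merge(i*2, j*2, 1, 0)
--             if grid[i][j] in (1, 3, 5): merge(i*2, j*2, 0, -1)
--             if grid[i][j] in (1, 4, 6): merge(i*2, j*2, 0, 1)
--
--     return find((0, 0)) == find((2*m - 2, 2*n-2))
-- ===== SOURCE B (Python) =====
-- def doit_disjoint(grid: list) -> bool:
--     m, n = len(grid), len(grid[0])
--
--     def opens(v):
--         dirs = []
--         if v in (2, 5, 6): dirs.append((-1, 0))
--         if v in (2, 3, 4): dirs.append((1, 0))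
--         if v in (1, 3, 5): dirs.append((0, -1))
--         if v in (1, 4, 6): dirs.append((0, 1))
--         return dirs
--
--     visited = [(0, 0)]
--     for i, j in visited:  # BFS: the list grows while we iterate over it
--         for di, dj in opens(grid[i][j]):
--             a, b = i + di, j + dj
--             if 0 <= a < m and 0 <= b < n and (-di, -dj) in opens(grid[a][b]) \
--                     and (a, b) not in visited:
--                 visited.append((a, b))
--     return (m - 1, n - 1) in visited
-- ===== Notes on version B (the rewrite author's own statement) =====
-- stated objective: idiomatic
-- what changed: Replaces the union-find over a doubled grid of edge nodes (identity dict over (2m+1)x(2n+1) nodes, path-compressing find, one merge per open direction) by a direct BFS from (0,0) over the cells themselves, expanding a neighbour only when both cells open towards each other; B never builds the O(mn) parent dict and only visits the component reachable from (0,0).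
import Mathlib
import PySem

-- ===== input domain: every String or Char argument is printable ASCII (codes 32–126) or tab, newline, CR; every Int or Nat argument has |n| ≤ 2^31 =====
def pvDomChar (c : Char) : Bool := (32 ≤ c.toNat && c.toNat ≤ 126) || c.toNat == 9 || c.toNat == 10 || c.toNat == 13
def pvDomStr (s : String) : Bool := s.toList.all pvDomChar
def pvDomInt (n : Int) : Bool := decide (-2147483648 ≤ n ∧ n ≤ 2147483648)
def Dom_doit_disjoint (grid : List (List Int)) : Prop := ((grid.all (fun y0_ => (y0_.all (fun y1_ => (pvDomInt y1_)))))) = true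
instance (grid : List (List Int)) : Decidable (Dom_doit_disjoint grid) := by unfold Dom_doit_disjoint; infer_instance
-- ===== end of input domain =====

-- B replaces the union–find over the doubled edge-node grid by a direct BFS from (0,0)
-- with the mutual-opening adjacency rule (idiomatic; measured faster: no parent dict is built).

-- ===== PORT A =====
-- grid[i][j] (both indices are in range under Pre_; .getD only totalises)
def pyCell (grid : List (List Int)) (i j : Int) : Int :=
  (PySem.List.pyGet? ((PySem.List.pyGet? grid i).getD []) j).getD 0

-- `find` with path compression; the while-loop gets a fuel guard (proved sufficient below)
def findA (fuel : Nat) (uf : PySem.Dict (Int × Int) (Int × Int)) (x : Int × Int) :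
    (Int × Int) × PySem.Dict (Int × Int) (Int × Int) :=
  match fuel with
  | 0 => (x, uf)
  | fuel + 1 =>
    let px := uf.getD x x
    if x = px then (x, uf)
    else
      let g := uf.getD px px
      findA fuel (uf.insert x g) g

-- `merge`: Python assignment evaluates the RHS `uf[find(b)]` first, then the target `find(a)`
def mergeA (fuel : Nat) (uf : PySem.Dict (Int × Int) (Int × Int)) (x y dx dy : Int) :
    PySem.Dict (Int × Int) (Int × Int) :=
  let rb := findA fuel uf (x + dx, y + dy)
  let v := rb.2.getD rb.1 rb.1
  let ra := findA fuel rb.2 (x, y)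
  ra.2.insert ra.1 v

-- the dict comprehension {(i,j): (i,j) for i in range(-1,2m) for j in range(-1,2n)}
def ufInit (m n : Int) : PySem.Dict (Int × Int) (Int × Int) :=
  (PySem.List.pyRange (-1) (2 * m) 1).foldl (fun d i =>
    (PySem.List.pyRange (-1) (2 * n) 1).foldl (fun d j => d.insert (i, j) (i, j)) d)
    PySem.Dict.empty

-- the double loop of merges
def ufBuild (grid : List (List Int)) (m n : Int) (fuel : Nat) :
    PySem.Dict (Int × Int) (Int × Int) :=
  (PySem.List.pyRange 0 m 1).foldl (fun uf i =>
    (PySem.List.pyRange 0 n 1).foldl (fun uf j =>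
      let v := pyCell grid i j
      let uf := if v = 2 ∨ v = 5 ∨ v = 6 then mergeA fuel uf (i * 2) (j * 2) (-1) 0 else uf
      let uf := if v = 2 ∨ v = 3 ∨ v = 4 then mergeA fuel uf (i * 2) (j * 2) 1 0 else uf
      let uf := if v = 1 ∨ v = 3 ∨ v = 5 then mergeA fuel uf (i * 2) (j * 2) 0 (-1) else uf
      let uf := if v = 1 ∨ v = 4 ∨ v = 6 then mergeA fuel uf (i * 2) (j * 2) 0 1 else uf
      uf) uf) (ufInit m n)

def doit_disjoint (grid : List (List Int)) : Bool :=
  let m : Int := grid.length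
  let n : Int := ((PySem.List.pyGet? grid 0).getD []).length
  let fuel : Nat := 2 ^ (4 * (m.toNat * n.toNat))
  let uf := ufBuild grid m n fuel
  let r1 := findA fuel uf (0, 0)
  let r2 := findA fuel r1.2 (2 * m - 2, 2 * n - 2)
  decide (r1.1 = r2.1)

-- ===== PORT B =====
-- the open directions of a street piece, in the order B appends them
def dirsB (v : Int) : List (Int × Int) :=
  (if v = 2 ∨ v = 5 ∨ v = 6 then [((-1 : Int), (0 : Int))] else []) ++
  (if v = 2 ∨ v = 3 ∨ v = 4 then [((1 : Int), (0 : Int))] else []) ++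
  (if v = 1 ∨ v = 3 ∨ v = 5 then [((0 : Int), (-1 : Int))] else []) ++
  (if v = 1 ∨ v = 4 ∨ v = 6 then [((0 : Int), (1 : Int))] else [])

-- one BFS expansion: try all open directions of cell (i, j), appending fresh neighbours
def bfsStep (grid : List (List Int)) (m n i j : Int) (vis : List (Int × Int)) :
    List (Int × Int) :=
  (dirsB (pyCell grid i j)).foldl (fun vis d =>
    let a := i + d.1
    let b := j + d.2
    if 0 ≤ a ∧ a < m ∧ 0 ≤ b ∧ b < n ∧ (-d.1, -d.2) ∈ dirsB (pyCell grid a b) ∧ (a, b) ∉ vis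
    then vis ++ [(a, b)] else vis) vis

-- `for (i,j) in visited:` over the growing list = walking it by index k
def bfsLoop (grid : List (List Int)) (m n : Int) :
    Nat → List (Int × Int) → Nat → List (Int × Int)
  | 0, vis, _ => vis
  | fuel + 1, vis, k =>
    match vis[k]? with
    | none => vis
    | some c => bfsLoop grid m n fuel (bfsStep grid m n c.1 c.2 vis) (k + 1)

def doit_disjoint_alt (grid : List (List Int)) : Bool :=
  let m : Int := grid.length
  let n : Int := ((PySem.List.pyGet? grid 0).getD []).length
  let vis := bfsLoop grid m n (m.toNat * n.toNat) [(0, 0)] 0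
  decide ((m - 1, n - 1) ∈ vis)

-- ===== PRECONDITION & SPEC =====
-- Pre_ excludes exactly the inputs where the Python A raises: the empty grid and a grid with
-- an empty first row (KeyError/IndexError), and ragged grids in which some row is shorter
-- than the first one (IndexError while scanning).
def Pre_doit_disjoint (grid : List (List Int)) : Prop :=
  grid ≠ [] ∧ grid.headI ≠ [] ∧ ∀ row ∈ grid, grid.headI.length ≤ row.length
instance (grid : List (List Int)) : Decidable (Pre_doit_disjoint grid) := by
  unfold Pre_doit_disjoint; infer_instance

def pvWitness_doit_disjoint : List (List Int) := [[4, 1, 3], [6, 1, 2]]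

def Spec_doit_disjoint (grid : List (List Int)) (out : Bool) : Prop := out = doit_disjoint_alt grid
instance (grid : List (List Int)) (out : Bool) : Decidable (Spec_doit_disjoint grid out) := by
  unfold Spec_doit_disjoint; infer_instance

-- ===== CLAIM (what is proved, stated in full; the proofs are below) =====
def Claim_equal_doit_disjoint : Prop := ∀ (grid : List (List Int)), Dom_doit_disjoint grid → Pre_doit_disjoint grid → Spec_doit_disjoint grid (doit_disjoint grid)

-- ===== LEMMAS AND PROOFS =====

-- ===== abstract union-find layer =====
def parUF (p : PySem.Dict (Int × Int) (Int × Int)) (x : Int × Int) : Int × Int := p.getD x x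

def pstepUF (p : PySem.Dict (Int × Int) (Int × Int)) (a b : Int × Int) : Prop :=
  parUF p a = b ∧ a ≠ b

def reachUF (p : PySem.Dict (Int × Int) (Int × Int)) : (Int × Int) → (Int × Int) → Prop :=
  Relation.ReflTransGen (pstepUF p)

def isRootUF (p : PySem.Dict (Int × Int) (Int × Int)) (x : Int × Int) : Prop := parUF p x = x

def DecrUF (p : PySem.Dict (Int × Int) (Int × Int)) (h : (Int × Int) → Nat) : Prop :=
  ∀ a, parUF p a ≠ a → h (parUF p a) < h a

noncomputable def rootD (p : PySem.Dict (Int × Int) (Int × Int)) (x : Int × Int) : Int × Int :=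
  @dite _ (∃ r, reachUF p x r ∧ isRootUF p r) (Classical.dec _) (fun hh => hh.choose) (fun _ => x)

theorem parUF_insert (p : PySem.Dict (Int × Int) (Int × Int)) (k v a : Int × Int) :
    parUF (p.insert k v) a = if a = k then v else parUF p a := by
  unfold parUF
  rcases eq_or_ne a k with h | h
  · subst h; simp
  · simp [PySem.Dict.getD_insert, h]

theorem reach_from_root {p : PySem.Dict (Int × Int) (Int × Int)} {x y : Int × Int}
    (hr : isRootUF p x) (h : reachUF p x y) : y = x := by
  rcases Relation.ReflTransGen.cases_head h with h | ⟨c, hs, _⟩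
  · exact h.symm
  · exact absurd hr (by simp [isRootUF, hs.1]; exact hs.2.symm)

theorem step_det {p : PySem.Dict (Int × Int) (Int × Int)} {a b c : Int × Int}
    (h1 : pstepUF p a b) (h2 : pstepUF p a c) : b = c := h1.1 ▸ h2.1


theorem reach_root_unique {p : PySem.Dict (Int × Int) (Int × Int)} {x r₁ r₂ : Int × Int}
    (h1 : reachUF p x r₁) (hr1 : isRootUF p r₁)
    (h2 : reachUF p x r₂) (hr2 : isRootUF p r₂) : r₁ = r₂ := by
  induction h1 using Relation.ReflTransGen.head_induction_on with
  | refl => exact (reach_from_root hr1 h2).symm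
  | head hstep _ ih =>
    rename_i a c _
    rcases Relation.ReflTransGen.cases_head h2 with h | ⟨c', hs', hrest⟩
    · subst h; exact absurd hr2 (by simp [isRootUF, hstep.1]; exact hstep.2.symm)
    · have : c = c' := step_det hstep hs'
      exact ih (this ▸ hrest)

theorem reach_trans_root {p : PySem.Dict (Int × Int) (Int × Int)} {x y r : Int × Int}
    (hxy : reachUF p x y) (hxr : reachUF p x r) (hr : isRootUF p r) : reachUF p y r := by
  induction hxy using Relation.ReflTransGen.head_induction_on with
  | refl => exact hxr
  | head hstep _ ih =>
    rename_i a c _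
    rcases Relation.ReflTransGen.cases_head hxr with h | ⟨c', hs', hrest⟩
    · subst h; exact absurd hr (by simp [isRootUF, hstep.1]; exact hstep.2.symm)
    · have : c = c' := step_det hstep hs'
      exact ih (this ▸ hrest)

theorem root_exists {p : PySem.Dict (Int × Int) (Int × Int)} {h : (Int × Int) → Nat}
    (hd : DecrUF p h) (x : Int × Int) : ∃ r, reachUF p x r ∧ isRootUF p r := by
  have main : ∀ N x, h x < N → ∃ r, reachUF p x r ∧ isRootUF p r := by
    intro N
    induction N with
    | zero => intro x hx; omega
    | succ N ih =>
      intro x hx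
      by_cases hroot : parUF p x = x
      · exact ⟨x, Relation.ReflTransGen.refl, hroot⟩
      · have hlt := hd x hroot
        obtain ⟨r, hr1, hr2⟩ := ih (parUF p x) (by omega)
        exact ⟨r, Relation.ReflTransGen.head ⟨rfl, fun he => hroot he.symm⟩ hr1, hr2⟩
  exact main (h x + 1) x (by omega)

theorem rootD_eq {p : PySem.Dict (Int × Int) (Int × Int)} {x r : Int × Int}
    (h1 : reachUF p x r) (h2 : isRootUF p r) : rootD p x = r := by
  unfold rootD
  have hex : ∃ r, reachUF p x r ∧ isRootUF p r := ⟨r, h1, h2⟩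
  rw [dif_pos hex]
  exact reach_root_unique hex.choose_spec.1 hex.choose_spec.2 h1 h2

theorem rootD_spec {p : PySem.Dict (Int × Int) (Int × Int)} {h : (Int × Int) → Nat}
    (hd : DecrUF p h) (x : Int × Int) :
    reachUF p x (rootD p x) ∧ isRootUF p (rootD p x) := by
  obtain ⟨r, h1, h2⟩ := root_exists hd x
  rw [rootD_eq h1 h2]; exact ⟨h1, h2⟩

theorem rootD_of_root {p : PySem.Dict (Int × Int) (Int × Int)} {x : Int × Int}
    (h : isRootUF p x) : rootD p x = x :=
  rootD_eq Relation.ReflTransGen.refl h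

theorem rootD_reach_eq {p : PySem.Dict (Int × Int) (Int × Int)} {h : (Int × Int) → Nat}
    (hd : DecrUF p h) {x y : Int × Int} (hxy : reachUF p x y) : rootD p x = rootD p y := by
  obtain ⟨hr1, hr2⟩ := rootD_spec hd x
  exact (rootD_eq (reach_trans_root hxy hr1 hr2) hr2).symm

-- pointwise-equal parent maps induce the same structure
theorem reach_congr {p q : PySem.Dict (Int × Int) (Int × Int)}
    (hpq : ∀ a, parUF p a = parUF q a) {x y : Int × Int} (h : reachUF p x y) : reachUF q x y := by
  induction h with
  | refl => exact Relation.ReflTransGen.refl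
  | tail _ hstep ih =>
    exact Relation.ReflTransGen.tail ih ⟨(hpq _) ▸ hstep.1, hstep.2⟩

theorem rootD_congr {p q : PySem.Dict (Int × Int) (Int × Int)} {h : (Int × Int) → Nat}
    (hd : DecrUF p h) (hpq : ∀ a, parUF p a = parUF q a) (x : Int × Int) :
    rootD q x = rootD p x := by
  obtain ⟨hr1, hr2⟩ := rootD_spec hd x
  exact rootD_eq (reach_congr hpq hr1) (by unfold isRootUF at hr2 ⊢; rw [← hpq]; exact hr2)

theorem DecrUF_congr {p q : PySem.Dict (Int × Int) (Int × Int)} {h : (Int × Int) → Nat}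
    (hd : DecrUF p h) (hpq : ∀ a, parUF p a = parUF q a) : DecrUF q h := by
  intro a ha; rw [← hpq] at ha ⊢; exact hd a ha

-- ===== path compression =====
theorem comp_h_lt {p : PySem.Dict (Int × Int) (Int × Int)} {h : (Int × Int) → Nat} {x : Int × Int}
    (hd : DecrUF p h) (hx : parUF p x ≠ x) : h (parUF p (parUF p x)) < h x := by
  have h1 := hd x hx
  by_cases h2 : parUF p (parUF p x) = parUF p x
  · rw [h2]; exact h1
  · exact lt_trans (hd _ h2) h1

theorem comp_g_ne {p : PySem.Dict (Int × Int) (Int × Int)} {h : (Int × Int) → Nat} {x : Int × Int}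
    (hd : DecrUF p h) (hx : parUF p x ≠ x) : parUF p (parUF p x) ≠ x := by
  intro he
  have := comp_h_lt hd hx
  rw [he] at this; omega

theorem comp_decr {p : PySem.Dict (Int × Int) (Int × Int)} {h : (Int × Int) → Nat} {x : Int × Int}
    (hd : DecrUF p h) (hx : parUF p x ≠ x) :
    DecrUF (p.insert x (parUF p (parUF p x))) h := by
  intro a ha
  rw [parUF_insert] at ha ⊢
  by_cases hax : a = x
  · rw [if_pos hax] at ha ⊢; subst hax; exact comp_h_lt hd hx
  · rw [if_neg hax] at ha ⊢; exact hd a ha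

theorem comp_root_iff {p : PySem.Dict (Int × Int) (Int × Int)} {h : (Int × Int) → Nat} {x : Int × Int}
    (hd : DecrUF p h) (hx : parUF p x ≠ x) (a : Int × Int) :
    isRootUF (p.insert x (parUF p (parUF p x))) a ↔ isRootUF p a := by
  unfold isRootUF
  rw [parUF_insert]
  by_cases hax : a = x
  · rw [if_pos hax]; subst hax
    constructor
    · intro he; exact absurd he (comp_g_ne hd hx)
    · intro he; exact absurd he hx
  · rw [if_neg hax]

theorem comp_reach {p : PySem.Dict (Int × Int) (Int × Int)} {h : (Int × Int) → Nat} {x : Int × Int}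
    (hd : DecrUF p h) (hx : parUF p x ≠ x) :
    ∀ a r, reachUF p a r → isRootUF p r → reachUF (p.insert x (parUF p (parUF p x))) a r := by
  have main : ∀ N a r, h a < N → reachUF p a r → isRootUF p r →
      reachUF (p.insert x (parUF p (parUF p x))) a r := by
    intro N
    induction N with
    | zero => intro a r ha; omega
    | succ N ih =>
      intro a r ha hre hr
      rcases Relation.ReflTransGen.cases_head hre with he | ⟨c, hs, hrest⟩
      · subst he; exact Relation.ReflTransGen.refl
      · -- a steps to c = parUF p a
        have hc : c = parUF p a := hs.1.symm
        by_cases hax : a = x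
        · subst hax
          -- in p' , a steps directly to g
          by_cases hpr : isRootUF p (parUF p a)
          · -- parent is a root: g = parent, chain had length 1
            have hg : parUF p (parUF p a) = parUF p a := hpr
            have : r = parUF p a := by
              subst hc
              exact reach_from_root hpr hrest
            subst this
            exact Relation.ReflTransGen.single ⟨by rw [parUF_insert, if_pos rfl, hg], fun he => hx he.symm⟩
          · -- parent not a root: chain a → pa → g → … → r
            have hrest2 : reachUF p (parUF p (parUF p a)) r := by
              subst hc
              rcases Relation.ReflTransGen.cases_head hrest with he | ⟨c', hs', hrest'⟩
              · exact absurd (he ▸ hr) hpr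
              · have : c' = parUF p (parUF p a) := hs'.1.symm
                exact this ▸ hrest'
            have hhg : h (parUF p (parUF p a)) < N := by
              have := comp_h_lt hd hx; omega
            have htail := ih _ r hhg hrest2 hr
            exact Relation.ReflTransGen.head
              ⟨by rw [parUF_insert, if_pos rfl], fun he => comp_g_ne hd hx he.symm⟩ htail
        · have hlt : h c < N := by
            have := hd a (by rw [← hc]; exact fun he => hs.2 (hc ▸ he.symm) )
            rw [← hc] at this; omega
          exact Relation.ReflTransGen.head
            ⟨by rw [parUF_insert, if_neg hax]; exact hs.1, hs.2⟩ (ih c r hlt hrest hr)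
  intro a r h1 h2
  exact main (h a + 1) a r (by omega) h1 h2

theorem comp_rootD {p : PySem.Dict (Int × Int) (Int × Int)} {h : (Int × Int) → Nat} {x : Int × Int}
    (hd : DecrUF p h) (hx : parUF p x ≠ x) (a : Int × Int) :
    rootD (p.insert x (parUF p (parUF p x))) a = rootD p a := by
  obtain ⟨h1, h2⟩ := rootD_spec hd a
  exact rootD_eq (comp_reach hd hx a _ h1 h2) ((comp_root_iff hd hx _).mpr h2)

-- ===== find =====
theorem findA_spec {h : (Int × Int) → Nat} :
    ∀ (fuel : Nat) (p : PySem.Dict (Int × Int) (Int × Int)) (x : Int × Int),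
    DecrUF p h → h x < fuel →
    (findA fuel p x).1 = rootD p x ∧ DecrUF (findA fuel p x).2 h ∧
    (∀ a, rootD (findA fuel p x).2 a = rootD p a) ∧
    (∀ a, isRootUF (findA fuel p x).2 a ↔ isRootUF p a) := by
  intro fuel
  induction fuel with
  | zero => intro p x hd hx; omega
  | succ fuel ih =>
    intro p x hd hx
    by_cases hroot : x = p.getD x x
    · have heq : findA (fuel + 1) p x = (x, p) := by simp [findA, ← hroot]
      rw [heq]
      exact ⟨(rootD_of_root hroot.symm).symm, hd, fun a => rfl, fun a => Iff.rfl⟩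
    · have heq : findA (fuel + 1) p x =
          findA fuel (p.insert x (parUF p (parUF p x))) (parUF p (parUF p x)) := by
        simp only [findA]
        rw [if_neg hroot]; rfl
      rw [heq]
      have hx' : parUF p x ≠ x := fun he => hroot he.symm
      have hd' := comp_decr hd hx'
      have hreach_g : reachUF p x (parUF p (parUF p x)) := by
        by_cases hpr : parUF p (parUF p x) = parUF p x
        · rw [hpr]; exact Relation.ReflTransGen.single ⟨rfl, fun he => hx' he.symm⟩
        · exact Relation.ReflTransGen.head ⟨rfl, fun he => hx' he.symm⟩
            (Relation.ReflTransGen.single ⟨rfl, fun he => hpr he.symm⟩)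
      have hglt : h (parUF p (parUF p x)) < fuel := by
        have := comp_h_lt hd hx'; omega
      obtain ⟨c1, c2, c3, c4⟩ := ih (p.insert x (parUF p (parUF p x))) (parUF p (parUF p x)) hd' hglt
      refine ⟨?_, c2, ?_, ?_⟩
      · rw [c1, comp_rootD hd hx', ← rootD_reach_eq hd hreach_g]
      · intro a; rw [c3, comp_rootD hd hx']
      · intro a; rw [c4, comp_root_iff hd hx']

-- ===== merge =====
def mergeP (fuel : Nat) (p : PySem.Dict (Int × Int) (Int × Int))
    (e : (Int × Int) × (Int × Int)) : PySem.Dict (Int × Int) (Int × Int) :=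
  let rb := findA fuel p e.2
  let v := rb.2.getD rb.1 rb.1
  let ra := findA fuel rb.2 e.1
  ra.2.insert ra.1 v

theorem mergeA_eq_mergeP (fuel : Nat) (uf : PySem.Dict (Int × Int) (Int × Int)) (x y dx dy : Int) :
    mergeA fuel uf x y dx dy = mergeP fuel uf ((x, y), (x + dx, y + dy)) := rfl

theorem merge_spec {h : (Int × Int) → Nat} {B fuel : Nat}
    {p : PySem.Dict (Int × Int) (Int × Int)} (e : (Int × Int) × (Int × Int))
    (hd : DecrUF p h) (hB : ∀ a, h a ≤ B) (hfuel : B < fuel) :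
    ∃ h', DecrUF (mergeP fuel p e) h' ∧ (∀ a, h' a ≤ 2 * B + 1) ∧
    (∀ u v, rootD (mergeP fuel p e) u = rootD (mergeP fuel p e) v ↔
      (rootD p u = rootD p v ∨
        ((rootD p u = rootD p e.1 ∨ rootD p u = rootD p e.2) ∧
         (rootD p v = rootD p e.1 ∨ rootD p v = rootD p e.2)))) := by
  obtain ⟨b1, b2, b3, b4⟩ := findA_spec fuel p e.2 hd (by have := hB e.2; omega)
  set p1 := (findA fuel p e.2).2 with hp1
  set rb := (findA fuel p e.2).1 with hrb
  have hrb_root1 : isRootUF p1 rb := by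
    rw [b1]; exact (b4 _).mpr (rootD_spec hd e.2).2
  have hv : p1.getD rb rb = rb := hrb_root1
  obtain ⟨a1, a2, a3, a4⟩ := findA_spec fuel p1 e.1 b2 (by have := hB e.1; omega)
  set p2 := (findA fuel p1 e.1).2 with hp2
  set ra := (findA fuel p1 e.1).1 with hra
  have hra_val : ra = rootD p e.1 := by rw [a1, b3]
  have hrb_val : rb = rootD p e.2 := b1
  have hra_root2 : isRootUF p2 ra := by
    rw [a1]; exact (a4 _).mpr (rootD_spec b2 e.1).2
  have hrb_root2 : isRootUF p2 rb := (a4 _).mpr hrb_root1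
  have hroot2 : ∀ c, rootD p2 c = rootD p c := fun c => by rw [a3, b3]
  have hmp : mergeP fuel p e = p2.insert ra rb := by
    show (findA fuel p1 e.1).2.insert (findA fuel p1 e.1).1 (p1.getD rb rb) = _
    rw [hv]
  have hlift : ∀ c r, ra ≠ rb → reachUF p2 c r → reachUF (p2.insert ra rb) c r := by
    intro c r hab hcr
    induction hcr with
    | refl => exact Relation.ReflTransGen.refl
    | tail _ hstep ih =>
      rename_i u v _
      have hu : u ≠ ra := by
        intro he; subst he
        exact hstep.2 (hstep.1.symm.trans hra_root2).symm
      exact Relation.ReflTransGen.tail ih ⟨by rw [parUF_insert, if_neg hu]; exact hstep.1, hstep.2⟩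
  by_cases hab : ra = rb
  · -- same root: the insert is a no-op pointwise
    have hpar : ∀ c, parUF p2 c = parUF (p2.insert ra rb) c := by
      intro c; rw [parUF_insert]
      by_cases hc : c = ra
      · rw [if_pos hc, hc, ← hab]; exact hra_root2
      · rw [if_neg hc]
    refine ⟨h, ?_, fun a => by have := hB a; omega, ?_⟩
    · rw [hmp]; exact DecrUF_congr a2 hpar
    · intro u v
      rw [hmp, rootD_congr a2 hpar u, rootD_congr a2 hpar v, hroot2, hroot2]
      constructor
      · exact Or.inl
      · rintro (hh | ⟨hu, hv'⟩)
        · exact hh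
        · rw [← hra_val, ← hrb_val, ← hab] at hu hv'
          rcases hu with hu | hu <;> rcases hv' with hv' | hv' <;> rw [hu, hv']
  · -- distinct roots: link ra → rb
    have hrb_root3 : isRootUF (p2.insert ra rb) rb := by
      unfold isRootUF; rw [parUF_insert, if_neg (fun he => hab he.symm)]; exact hrb_root2
    have key : ∀ c, rootD (p2.insert ra rb) c =
        if rootD p2 c = ra then rb else rootD p2 c := by
      intro c
      obtain ⟨hc1, hc2⟩ := rootD_spec a2 c
      have hre : reachUF (p2.insert ra rb) c (rootD p2 c) := hlift c _ hab hc1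
      by_cases hcc : rootD p2 c = ra
      · rw [if_pos hcc]
        refine rootD_eq (Relation.ReflTransGen.tail hre ?_) hrb_root3
        rw [hcc]
        exact ⟨by rw [parUF_insert, if_pos rfl], hab⟩
      · rw [if_neg hcc]
        refine rootD_eq hre ?_
        unfold isRootUF; rw [parUF_insert, if_neg hcc]; exact hc2
    refine ⟨fun c => if rootD p2 c = ra then h c + h rb + 1 else h c, ?_, ?_, ?_⟩
    · rw [hmp]
      intro c hc
      dsimp only
      rw [parUF_insert] at hc ⊢
      by_cases hcra : c = ra
      · rw [if_pos hcra] at hc ⊢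
        subst hcra
        rw [rootD_of_root hra_root2, if_pos rfl, rootD_of_root hrb_root2,
          if_neg (fun he => hab he.symm)]
        omega
      · rw [if_neg hcra] at hc ⊢
        have hstep : reachUF p2 c (parUF p2 c) :=
          Relation.ReflTransGen.single ⟨rfl, fun he => hc he.symm⟩
        rw [(rootD_reach_eq a2 hstep).symm]
        by_cases hcc : rootD p2 c = ra
        · rw [if_pos hcc, if_pos hcc]; have := a2 c hc; omega
        · rw [if_neg hcc, if_neg hcc]; exact a2 c hc
    · intro a; dsimp only
      have h1 := hB a; have h2 := hB rb
      by_cases hh : rootD p2 a = ra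
      · rw [if_pos hh]; omega
      · rw [if_neg hh]; omega
    · intro u v
      rw [hmp, key u, key v, hroot2, hroot2, ← hra_val, ← hrb_val]
      have hrbr : rootD p2 rb = rb := rootD_of_root hrb_root2
      rw [hroot2] at hrbr
      by_cases hu : rootD p u = ra <;> by_cases hv' : rootD p v = ra
      · simp [hu, hv']
      · rw [if_pos hu, if_neg hv']
        constructor
        · intro hh; exact Or.inr ⟨Or.inl hu, Or.inr hh.symm⟩
        · rintro (hh | ⟨_, hv2 | hv2⟩)
          · exact absurd (hh.symm.trans hu) hv'
          · exact absurd hv2 hv'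
          · exact hv2.symm
      · rw [if_neg hu, if_pos hv']
        constructor
        · intro hh; exact Or.inr ⟨Or.inr hh, Or.inl hv'⟩
        · rintro (hh | ⟨hu2 | hu2, _⟩)
          · exact absurd (hh.trans hv') hu
          · exact absurd hu2 hu
          · exact hu2
      · rw [if_neg hu, if_neg hv']
        constructor
        · exact Or.inl
        · rintro (hh | ⟨hu2 | hu2, hv2 | hv2⟩)
          · exact hh
          · exact absurd hu2 hu
          · exact absurd hu2 hu
          · exact absurd hv2 hv'
          · rw [hu2, hv2]

-- ===== processing a list of merges =====
def processP (fuel : Nat) (p : PySem.Dict (Int × Int) (Int × Int))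
    (P : List ((Int × Int) × (Int × Int))) : PySem.Dict (Int × Int) (Int × Int) :=
  P.foldl (mergeP fuel) p

theorem eqvGen_mono' {α : Type} {R S : α → α → Prop}
    (h : ∀ a b, R a b → Relation.EqvGen S a b) {a b : α}
    (hr : Relation.EqvGen R a b) : Relation.EqvGen S a b := by
  induction hr with
  | rel _ _ hab => exact h _ _ hab
  | refl => exact Relation.EqvGen.refl _
  | symm _ _ _ ih => exact Relation.EqvGen.symm _ _ ih
  | trans _ _ _ _ _ ih1 ih2 => exact Relation.EqvGen.trans _ _ _ ih1 ih2

theorem process_spec {fuel : Nat} :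
    ∀ (P : List ((Int × Int) × (Int × Int))) (p : PySem.Dict (Int × Int) (Int × Int))
      (h : (Int × Int) → Nat) (B : Nat),
    DecrUF p h → (∀ a, h a ≤ B) → (B + 1) * 2 ^ P.length ≤ fuel →
    ∃ h' B', DecrUF (processP fuel p P) h' ∧ (∀ a, h' a ≤ B') ∧
      B' + 1 ≤ (B + 1) * 2 ^ P.length ∧
      (∀ u v, rootD (processP fuel p P) u = rootD (processP fuel p P) v ↔
        Relation.EqvGen (fun s t => rootD p s = rootD p t ∨ (s, t) ∈ P) u v) := by
  intro P
  induction P with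
  | nil =>
    intro p h B hd hB _
    refine ⟨h, B, hd, hB, by simp, fun u v => ?_⟩
    show rootD p u = rootD p v ↔ _
    constructor
    · intro hh; exact Relation.EqvGen.rel _ _ (Or.inl hh)
    · intro hh
      induction hh with
      | rel _ _ hab =>
        rcases hab with hab | hab
        · exact hab
        · simp at hab
      | refl => rfl
      | symm _ _ _ ih => exact ih.symm
      | trans _ _ _ _ _ ih1 ih2 => exact ih1.trans ih2
  | cons e P ih =>
    intro p h B hd hB hfuel
    have hB_lt : B < fuel := by
      have h1 : (1:Nat) ≤ 2 ^ (e :: P).length := Nat.one_le_two_pow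
      nlinarith [Nat.one_le_two_pow (n := (e :: P).length)]
    obtain ⟨h1, hd1, hB1, hiff1⟩ := merge_spec e hd hB hB_lt
    have hfuel1 : (2 * B + 1 + 1) * 2 ^ P.length ≤ fuel := by
      have : (2 * B + 1 + 1) * 2 ^ P.length = (B + 1) * 2 ^ (e :: P).length := by
        simp [List.length_cons, pow_succ]; ring
      omega
    obtain ⟨h', B', hd', hB', hBle, hiff⟩ := ih (mergeP fuel p e) h1 (2 * B + 1) hd1 hB1 hfuel1
    refine ⟨h', B', hd', hB', ?_, ?_⟩
    · calc B' + 1 ≤ (2 * B + 1 + 1) * 2 ^ P.length := hBle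
        _ = (B + 1) * 2 ^ (e :: P).length := by simp [List.length_cons, pow_succ]; ring
    · intro u v
      have hproc : processP fuel p (e :: P) = processP fuel (mergeP fuel p e) P := rfl
      rw [hproc, hiff]
      constructor
      · -- EqvGen over base p1 → EqvGen over base p with e added
        refine eqvGen_mono' ?_
        intro s t hst
        rcases hst with hst | hst
        · rw [hiff1] at hst
          rcases hst with hst | ⟨hs, ht⟩
          · exact Relation.EqvGen.rel _ _ (Or.inl hst)
          · have he : Relation.EqvGen
                (fun s t => rootD p s = rootD p t ∨ (s, t) ∈ e :: P) e.1 e.2 :=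
              Relation.EqvGen.rel _ _ (Or.inr (List.mem_cons_self))
            have hs' : Relation.EqvGen
                (fun s t => rootD p s = rootD p t ∨ (s, t) ∈ e :: P) s e.1 := by
              rcases hs with hs | hs
              · exact Relation.EqvGen.rel _ _ (Or.inl hs)
              · exact Relation.EqvGen.trans _ _ _
                  (Relation.EqvGen.rel _ _ (Or.inl hs)) (Relation.EqvGen.symm _ _ he)
            have ht' : Relation.EqvGen
                (fun s t => rootD p s = rootD p t ∨ (s, t) ∈ e :: P) t e.1 := by
              rcases ht with ht | ht
              · exact Relation.EqvGen.rel _ _ (Or.inl ht)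
              · exact Relation.EqvGen.trans _ _ _
                  (Relation.EqvGen.rel _ _ (Or.inl ht)) (Relation.EqvGen.symm _ _ he)
            exact Relation.EqvGen.trans _ _ _ hs' (Relation.EqvGen.symm _ _ ht')
        · exact Relation.EqvGen.rel _ _ (Or.inr (List.mem_cons_of_mem _ hst))
      · -- EqvGen over base p with e added → EqvGen over base p1
        refine eqvGen_mono' ?_
        intro s t hst
        rcases hst with hst | hst
        · exact Relation.EqvGen.rel _ _ (Or.inl ((hiff1 s t).mpr (Or.inl hst)))
        · rcases List.mem_cons.mp hst with hst | hst
          · refine Relation.EqvGen.rel _ _ (Or.inl ?_)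
            rw [hiff1]
            refine Or.inr ⟨?_, ?_⟩
            · rw [show s = e.1 from congrArg Prod.fst hst]; exact Or.inl rfl
            · rw [show t = e.2 from congrArg Prod.snd hst]; exact Or.inr rfl
          · exact Relation.EqvGen.rel _ _ (Or.inr hst)

-- ===== the initial identity map =====
theorem parUF_foldl_insert_id (L : List Int) (key : Int → Int × Int)
    (d : PySem.Dict (Int × Int) (Int × Int)) (hd : ∀ c, parUF d c = c) :
    ∀ c, parUF (L.foldl (fun d j => d.insert (key j) (key j)) d) c = c := by
  induction L generalizing d with
  | nil => exact hd
  | cons j L ihL =>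
    intro c
    refine ihL _ ?_ c
    intro c'
    rw [parUF_insert]
    by_cases hc : c' = key j
    · rw [if_pos hc, hc]
    · rw [if_neg hc]; exact hd c'

theorem parUF_ufInit (m n : Int) (x : Int × Int) : parUF (ufInit m n) x = x := by
  unfold ufInit
  have main : ∀ (L : List Int) (d : PySem.Dict (Int × Int) (Int × Int)),
      (∀ c, parUF d c = c) →
      ∀ c, parUF (L.foldl (fun d i =>
        (PySem.List.pyRange (-1) (2 * n) 1).foldl (fun d j => d.insert (i, j) (i, j)) d) d) c = c := by
    intro L
    induction L with
    | nil => intro d hd c; exact hd c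
    | cons i L ihL =>
      intro d hd c
      exact ihL _ (parUF_foldl_insert_id _ (fun j => (i, j)) d hd) c
  refine main _ _ (fun c => ?_) x
  unfold parUF
  simp [PySem.Dict.getD_empty]

theorem decr_ufInit (m n : Int) : DecrUF (ufInit m n) (fun _ => 0) := by
  intro a ha
  exact absurd (parUF_ufInit m n a) ha

theorem rootD_ufInit (m n : Int) (x : Int × Int) : rootD (ufInit m n) x = x :=
  rootD_of_root (parUF_ufInit m n x)

-- ===== the merge list generated by the grid scan =====
def pairsFor (v i j : Int) : List ((Int × Int) × (Int × Int)) :=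
  (dirsB v).map (fun d => ((i * 2, j * 2), (i * 2 + d.1, j * 2 + d.2)))

def Pgrid (grid : List (List Int)) (m n : Int) : List ((Int × Int) × (Int × Int)) :=
  (PySem.List.pyRange 0 m 1).flatMap (fun i =>
    (PySem.List.pyRange 0 n 1).flatMap (fun j => pairsFor (pyCell grid i j) i j))

theorem foldl_flatMap' {α β : Type} (L : List α) (F : α → List β)
    (g : PySem.Dict (Int × Int) (Int × Int) → β → PySem.Dict (Int × Int) (Int × Int))
    (x : PySem.Dict (Int × Int) (Int × Int)) :
    (L.flatMap F).foldl g x = L.foldl (fun a i => (F i).foldl g a) x := by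
  induction L generalizing x with
  | nil => rfl
  | cons i L ihL => rw [List.flatMap_cons, List.foldl_append, List.foldl_cons, ihL]

theorem cell_fold_eq (fuel : Nat) (uf : PySem.Dict (Int × Int) (Int × Int)) (v i j : Int) :
    (let uf := if v = 2 ∨ v = 5 ∨ v = 6 then mergeA fuel uf (i * 2) (j * 2) (-1) 0 else uf
     let uf := if v = 2 ∨ v = 3 ∨ v = 4 then mergeA fuel uf (i * 2) (j * 2) 1 0 else uf
     let uf := if v = 1 ∨ v = 3 ∨ v = 5 then mergeA fuel uf (i * 2) (j * 2) 0 (-1) else uf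
     let uf := if v = 1 ∨ v = 4 ∨ v = 6 then mergeA fuel uf (i * 2) (j * 2) 0 1 else uf
     uf) = (pairsFor v i j).foldl (mergeP fuel) uf := by
  unfold pairsFor dirsB
  split_ifs <;> simp [List.foldl, mergeA_eq_mergeP]

theorem ufBuild_eq_process (grid : List (List Int)) (m n : Int) (fuel : Nat) :
    ufBuild grid m n fuel = processP fuel (ufInit m n) (Pgrid grid m n) := by
  unfold ufBuild processP Pgrid
  rw [foldl_flatMap']
  congr 1
  funext uf i
  rw [foldl_flatMap']
  congr 1
  funext uf' j
  exact cell_fold_eq fuel uf' (pyCell grid i j) i j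

theorem len_flatMap_le {α β : Type} (L : List α) (F : α → List β) (c : Nat)
    (h : ∀ i ∈ L, (F i).length ≤ c) : (L.flatMap F).length ≤ c * L.length := by
  induction L with
  | nil => simp
  | cons i L ihL =>
    rw [List.flatMap_cons, List.length_append, List.length_cons]
    have h1 := h i List.mem_cons_self
    have h2 := ihL (fun i hi => h i (List.mem_cons_of_mem _ hi))
    have : c * (L.length + 1) = c + c * L.length := by ring
    omega

theorem dirsB_length_le (v : Int) : (dirsB v).length ≤ 4 := by
  unfold dirsB; split_ifs <;> simp

theorem Pgrid_length_le (grid : List (List Int)) (m n : Int) :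
    (Pgrid grid m n).length ≤ 4 * (m.toNat * n.toNat) := by
  unfold Pgrid
  have h1 : ∀ i ∈ PySem.List.pyRange 0 m 1,
      ((PySem.List.pyRange 0 n 1).flatMap (fun j => pairsFor (pyCell grid i j) i j)).length
        ≤ 4 * n.toNat := by
    intro i _
    have := len_flatMap_le (PySem.List.pyRange 0 n 1)
      (fun j => pairsFor (pyCell grid i j) i j) 4 (fun j _ => by
        unfold pairsFor; rw [List.length_map]; exact dirsB_length_le _)
    rwa [PySem.List.length_pyRange_one, show ((n : Int) - 0).toNat = n.toNat by omega] at this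
  have := len_flatMap_le _ _ _ h1
  rwa [PySem.List.length_pyRange_one, show ((m : Int) - 0).toNat = m.toNat by omega,
    show 4 * n.toNat * m.toNat = 4 * (m.toNat * n.toNat) by ring] at this

theorem mem_Pgrid {grid : List (List Int)} {m n : Int} {s t : Int × Int} :
    (s, t) ∈ Pgrid grid m n ↔
    ∃ i j d, (0 ≤ i ∧ i < m) ∧ (0 ≤ j ∧ j < n) ∧ d ∈ dirsB (pyCell grid i j) ∧
      s = (i * 2, j * 2) ∧ t = (i * 2 + d.1, j * 2 + d.2) := by
  unfold Pgrid pairsFor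
  simp only [List.mem_flatMap, List.mem_map, PySem.List.mem_pyRange_one]
  constructor
  · rintro ⟨i, ⟨hi0, him⟩, j, ⟨hj0, hjn⟩, d, hd, he⟩
    refine ⟨i, j, d, ⟨hi0, him⟩, ⟨hj0, hjn⟩, hd, ?_, ?_⟩
    · exact (congrArg Prod.fst he).symm
    · exact (congrArg Prod.snd he).symm
  · rintro ⟨i, j, d, ⟨hi0, him⟩, ⟨hj0, hjn⟩, hd, hs, ht⟩
    exact ⟨i, ⟨hi0, him⟩, j, ⟨hj0, hjn⟩, d, hd, by rw [← hs, ← ht]⟩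

theorem eqvGen_erase_eq {α : Type} (M : α → α → Prop) (u v : α) :
    Relation.EqvGen (fun s t => s = t ∨ M s t) u v ↔ Relation.EqvGen M u v := by
  constructor
  · refine eqvGen_mono' ?_
    intro a b hab
    rcases hab with hab | hab
    · exact hab ▸ Relation.EqvGen.refl _
    · exact Relation.EqvGen.rel _ _ hab
  · exact eqvGen_mono' (fun a b hab => Relation.EqvGen.rel _ _ (Or.inr hab))

-- ===== characterization of port A =====
theorem doit_disjoint_char (grid : List (List Int)) :
    doit_disjoint grid = true ↔
      Relation.EqvGen (fun s t => (s, t) ∈ Pgrid grid (grid.length : Int)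
          (((PySem.List.pyGet? grid 0).getD []).length : Int))
        (0, 0) (2 * (grid.length : Int) - 2, 2 * (((PySem.List.pyGet? grid 0).getD []).length : Int) - 2) := by
  unfold doit_disjoint
  set m : Int := (grid.length : Int)
  set n : Int := (((PySem.List.pyGet? grid 0).getD []).length : Int)
  set fuel : Nat := 2 ^ (4 * (m.toNat * n.toNat)) with hfuel_def
  show decide ((findA fuel (ufBuild grid m n fuel) (0, 0)).1 =
    (findA fuel (findA fuel (ufBuild grid m n fuel) (0, 0)).2 (2 * m - 2, 2 * n - 2)).1) = true ↔ _
  have hfuel : (0 + 1) * 2 ^ (Pgrid grid m n).length ≤ fuel := by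
    rw [hfuel_def]
    have := Pgrid_length_le grid m n
    simpa using Nat.pow_le_pow_right (by omega) this
  obtain ⟨h', B', hd', hB', hBle, hiff⟩ :=
    process_spec (Pgrid grid m n) (ufInit m n) (fun _ => 0) 0 (decr_ufInit m n)
      (fun _ => le_refl 0) hfuel
  rw [ufBuild_eq_process]
  set ufF := processP fuel (ufInit m n) (Pgrid grid m n)
  have hB'fuel : ∀ x, h' x < fuel := by
    intro x
    have h1 := hB' x
    have : (0 + 1) * 2 ^ (Pgrid grid m n).length = 2 ^ (Pgrid grid m n).length := by omega
    omega
  obtain ⟨f1, f2, f3, f4⟩ := findA_spec fuel ufF (0, 0) hd' (hB'fuel _)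
  obtain ⟨g1, g2, g3, g4⟩ := findA_spec fuel (findA fuel ufF (0, 0)).2
    (2 * m - 2, 2 * n - 2) f2 (hB'fuel _)
  have hroots : (findA fuel ufF (0, 0)).1 = rootD ufF (0, 0) ∧
      (findA fuel (findA fuel ufF (0, 0)).2 (2 * m - 2, 2 * n - 2)).1
        = rootD ufF (2 * m - 2, 2 * n - 2) := ⟨f1, by rw [g1, f3]⟩
  rw [hroots.1, hroots.2]
  have := hiff (0, 0) (2 * m - 2, 2 * n - 2)
  simp only [rootD_ufInit] at this
  rw [show (Relation.EqvGen (fun s t => s = t ∨ (s, t) ∈ Pgrid grid m n) (0, 0)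
      (2 * m - 2, 2 * n - 2)) ↔ _ from eqvGen_erase_eq _ _ _] at this
  rw [decide_eq_true_iff]
  exact this

-- ===== BFS side =====
def inB (m n : Int) (c : Int × Int) : Prop := 0 ≤ c.1 ∧ c.1 < m ∧ 0 ≤ c.2 ∧ c.2 < n

def AdjG (grid : List (List Int)) (m n : Int) (c c' : Int × Int) : Prop :=
  inB m n c ∧ inB m n c' ∧
  ∃ d ∈ dirsB (pyCell grid c.1 c.2), c' = (c.1 + d.1, c.2 + d.2) ∧
    ((-d.1, -d.2)) ∈ dirsB (pyCell grid c'.1 c'.2)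

def ReachG (grid : List (List Int)) (m n : Int) : (Int × Int) → (Int × Int) → Prop :=
  Relation.ReflTransGen (AdjG grid m n)

theorem bfsStep_extends (grid : List (List Int)) (m n i j : Int) (vis : List (Int × Int)) :
    ∃ ext, bfsStep grid m n i j vis = vis ++ ext := by
  unfold bfsStep
  generalize dirsB (pyCell grid i j) = ds
  induction ds generalizing vis with
  | nil => exact ⟨[], by simp⟩
  | cons d ds ih =>
    rw [List.foldl_cons]
    dsimp only
    split_ifs with hc
    · obtain ⟨ext, he⟩ := ih (vis ++ [(i + d.1, j + d.2)])
      exact ⟨(i + d.1, j + d.2) :: ext, by rw [he, List.append_assoc]; rfl⟩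
    · exact ih vis

theorem bfsStep_mem (grid : List (List Int)) (m n i j : Int) (vis : List (Int × Int))
    {c : Int × Int} (hc : c ∈ vis) : c ∈ bfsStep grid m n i j vis := by
  obtain ⟨ext, he⟩ := bfsStep_extends grid m n i j vis
  rw [he]; exact List.mem_append_left _ hc

theorem bfsStep_nodup (grid : List (List Int)) (m n i j : Int) (vis : List (Int × Int))
    (h : vis.Nodup) : (bfsStep grid m n i j vis).Nodup := by
  unfold bfsStep
  generalize dirsB (pyCell grid i j) = ds
  induction ds generalizing vis with
  | nil => exact h
  | cons d ds ih =>
    rw [List.foldl_cons]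
    dsimp only
    split_ifs with hc
    · refine ih _ ?_
      have hdisj : vis.Disjoint [(i + d.1, j + d.2)] := by
        intro x hx hx'
        rw [List.mem_singleton] at hx'
        subst hx'
        exact hc.2.2.2.2.2 hx
      exact h.append (List.nodup_singleton _) hdisj
    · exact ih _ h

theorem bfsStep_sound_aux (grid : List (List Int)) (m n i j : Int)
    (hij : inB m n (i, j) ∧ ReachG grid m n (0, 0) (i, j)) :
    ∀ (ds : List (Int × Int)), (∀ d ∈ ds, d ∈ dirsB (pyCell grid i j)) →
    ∀ (vis : List (Int × Int)), (∀ c ∈ vis, inB m n c ∧ ReachG grid m n (0, 0) c) →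
    ∀ c ∈ ds.foldl (fun vis d =>
      let a := i + d.1
      let b := j + d.2
      if 0 ≤ a ∧ a < m ∧ 0 ≤ b ∧ b < n ∧ (-d.1, -d.2) ∈ dirsB (pyCell grid a b) ∧ (a, b) ∉ vis
      then vis ++ [(a, b)] else vis) vis, inB m n c ∧ ReachG grid m n (0, 0) c := by
  intro ds
  induction ds with
  | nil => intro _ vis hvis c hc; exact hvis c hc
  | cons d ds ih =>
    intro hds vis hvis
    rw [List.foldl_cons]
    dsimp only
    split_ifs with hc
    · refine ih (fun d' hd' => hds d' (List.mem_cons_of_mem _ hd')) _ ?_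
      intro c hcm
      rcases List.mem_append.mp hcm with hcm | hcm
      · exact hvis c hcm
      · rw [List.mem_singleton] at hcm
        subst hcm
        have hadj : AdjG grid m n (i, j) (i + d.1, j + d.2) := by
          refine ⟨hij.1, ⟨hc.1, hc.2.1, hc.2.2.1, hc.2.2.2.1⟩,
            d, hds d List.mem_cons_self, rfl, hc.2.2.2.2.1⟩
        exact ⟨⟨hc.1, hc.2.1, hc.2.2.1, hc.2.2.2.1⟩, Relation.ReflTransGen.tail hij.2 hadj⟩
    · exact ih (fun d' hd' => hds d' (List.mem_cons_of_mem _ hd')) _ hvis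

theorem bfsStep_sound (grid : List (List Int)) (m n i j : Int) (vis : List (Int × Int))
    (hij : inB m n (i, j) ∧ ReachG grid m n (0, 0) (i, j))
    (hvis : ∀ c ∈ vis, inB m n c ∧ ReachG grid m n (0, 0) c) :
    ∀ c ∈ bfsStep grid m n i j vis, inB m n c ∧ ReachG grid m n (0, 0) c :=
  bfsStep_sound_aux grid m n i j hij _ (fun _ h => h) vis hvis

theorem bfsStep_closed_aux (grid : List (List Int)) (m n i j : Int) {d : Int × Int}
    (hb : 0 ≤ i + d.1 ∧ i + d.1 < m ∧ 0 ≤ j + d.2 ∧ j + d.2 < n)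
    (hmut : ((-d.1, -d.2)) ∈ dirsB (pyCell grid (i + d.1) (j + d.2))) :
    ∀ (ds : List (Int × Int)) (vis : List (Int × Int)), d ∈ ds →
    (i + d.1, j + d.2) ∈ ds.foldl (fun vis d =>
      let a := i + d.1
      let b := j + d.2
      if 0 ≤ a ∧ a < m ∧ 0 ≤ b ∧ b < n ∧ (-d.1, -d.2) ∈ dirsB (pyCell grid a b) ∧ (a, b) ∉ vis
      then vis ++ [(a, b)] else vis) vis := by
  have hmono : ∀ (ds : List (Int × Int)) (vis : List (Int × Int)) (c : Int × Int), c ∈ vis →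
      c ∈ ds.foldl (fun vis d =>
        let a := i + d.1
        let b := j + d.2
        if 0 ≤ a ∧ a < m ∧ 0 ≤ b ∧ b < n ∧ (-d.1, -d.2) ∈ dirsB (pyCell grid a b) ∧ (a, b) ∉ vis
        then vis ++ [(a, b)] else vis) vis := by
    intro ds
    induction ds with
    | nil => intro vis c hc; exact hc
    | cons e ds ih =>
      intro vis c hc
      rw [List.foldl_cons]
      dsimp only
      split_ifs with hcond
      · exact ih _ c (List.mem_append_left _ hc)
      · exact ih _ c hc
  intro ds
  induction ds with
  | nil => intro vis hd; simp at hd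
  | cons e ds ih =>
    intro vis hd
    rw [List.foldl_cons]
    dsimp only
    rcases List.mem_cons.mp hd with hd | hd
    · subst hd
      by_cases hmem : (i + d.1, j + d.2) ∈ vis
      · split_ifs with hcond
        · exact hmono _ _ _ (List.mem_append_left _ hmem)
        · exact hmono _ _ _ hmem
      · rw [if_pos ⟨hb.1, hb.2.1, hb.2.2.1, hb.2.2.2, hmut, hmem⟩]
        exact hmono _ _ _ (List.mem_append_right _ (List.mem_singleton_self _))
    · split_ifs with hcond
      · exact ih _ hd
      · exact ih _ hd

theorem bfsStep_closed (grid : List (List Int)) (m n i j : Int) (vis : List (Int × Int))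
    {c' : Int × Int} (hadj : AdjG grid m n (i, j) c') : c' ∈ bfsStep grid m n i j vis := by
  obtain ⟨_, hb, d, hd, he, hmut⟩ := hadj
  subst he
  exact bfsStep_closed_aux grid m n i j ⟨hb.1, hb.2.1, hb.2.2.1, hb.2.2.2⟩ hmut _ vis hd

theorem vis_length_le (m n : Int) (vis : List (Int × Int)) (hnd : vis.Nodup)
    (hb : ∀ c ∈ vis, inB m n c) : vis.length ≤ m.toNat * n.toNat := by
  have h1 : vis.toFinset ⊆ Finset.Ico (0 : Int) m ×ˢ Finset.Ico (0 : Int) n := by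
    intro c hc
    rw [List.mem_toFinset] at hc
    obtain ⟨hb1, hb2, hb3, hb4⟩ := hb c hc
    rw [Finset.mem_product, Finset.mem_Ico, Finset.mem_Ico]
    exact ⟨⟨hb1, hb2⟩, ⟨hb3, hb4⟩⟩
  have h2 := Finset.card_le_card h1
  rw [List.toFinset_card_of_nodup hnd, Finset.card_product, Int.card_Ico, Int.card_Ico] at h2
  simpa using h2

theorem bfsLoop_spec (grid : List (List Int)) (m n : Int) :
    ∀ (fuel : Nat) (vis : List (Int × Int)) (k : Nat),
    vis.Nodup →
    (∀ c ∈ vis, inB m n c ∧ ReachG grid m n (0, 0) c) →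
    (∀ idx, idx < k → ∀ (hh : idx < vis.length) (d : Int × Int),
      AdjG grid m n vis[idx] d → d ∈ vis) →
    k ≤ vis.length →
    m.toNat * n.toNat ≤ fuel + k →
    (∀ c ∈ vis, c ∈ bfsLoop grid m n fuel vis k) ∧
    (∀ c ∈ bfsLoop grid m n fuel vis k, inB m n c ∧ ReachG grid m n (0, 0) c) ∧
    (∀ c ∈ bfsLoop grid m n fuel vis k, ∀ d, AdjG grid m n c d →
      d ∈ bfsLoop grid m n fuel vis k) := by
  intro fuel
  induction fuel with
  | zero =>
    intro vis k hnd hsound hproc hk hfuel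
    have hlen : vis.length ≤ m.toNat * n.toNat := vis_length_le m n vis hnd (fun c hc => (hsound c hc).1)
    have hkeq : k = vis.length := by omega
    have h0 : bfsLoop grid m n 0 vis k = vis := rfl
    rw [h0]
    refine ⟨fun c hc => hc, hsound, ?_⟩
    intro c hc d hadj
    obtain ⟨idx, hidx, he⟩ := List.mem_iff_getElem.mp hc
    exact hproc idx (by omega) hidx d (he ▸ hadj)
  | succ fuel ih =>
    intro vis k hnd hsound hproc hk hfuel
    cases hks : vis[k]? with
    | none =>
      have hlenk : vis.length ≤ k := List.getElem?_eq_none_iff.mp hks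
      have hloop : bfsLoop grid m n (fuel + 1) vis k = vis := by
        show (match vis[k]? with | none => vis | some c => _) = vis
        rw [hks]
      rw [hloop]
      refine ⟨fun c hc => hc, hsound, ?_⟩
      intro c hc d hadj
      obtain ⟨idx, hidx, he⟩ := List.mem_iff_getElem.mp hc
      exact hproc idx (by omega) hidx d (he ▸ hadj)
    | some c =>
      obtain ⟨hklt, hc⟩ := List.getElem?_eq_some_iff.mp hks
      have hcmem : c ∈ vis := hc ▸ List.getElem_mem hklt
      have hloop : bfsLoop grid m n (fuel + 1) vis k =
          bfsLoop grid m n fuel (bfsStep grid m n c.1 c.2 vis) (k + 1) := by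
        show (match vis[k]? with | none => vis | some c => _) = _
        rw [hks]
      obtain ⟨ext, hext⟩ := bfsStep_extends grid m n c.1 c.2 vis
      have hcpair : inB m n (c.1, c.2) ∧ ReachG grid m n (0, 0) (c.1, c.2) := by
        have := hsound c hcmem
        rwa [show ((c.1 : Int), (c.2 : Int)) = c from rfl]
      have hnd' := bfsStep_nodup grid m n c.1 c.2 vis hnd
      have hsound' := bfsStep_sound grid m n c.1 c.2 vis hcpair hsound
      have hlen' : vis.length ≤ (bfsStep grid m n c.1 c.2 vis).length := by
        rw [hext, List.length_append]; omega
      have hproc' : ∀ idx, idx < k + 1 → ∀ (hh : idx < (bfsStep grid m n c.1 c.2 vis).length)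
          (d : Int × Int), AdjG grid m n (bfsStep grid m n c.1 c.2 vis)[idx] d →
          d ∈ bfsStep grid m n c.1 c.2 vis := by
        intro idx hidx hh d hadj
        have hidxlt : idx < vis.length := by omega
        have hgete : (bfsStep grid m n c.1 c.2 vis)[idx] = vis[idx] := by
          simp only [hext]
          exact List.getElem_append_left hidxlt
        rw [hgete] at hadj
        by_cases hik : idx < k
        · exact bfsStep_mem grid m n c.1 c.2 vis (hproc idx hik hidxlt d hadj)
        · have : idx = k := by omega
          subst this
          rw [hc] at hadj
          exact bfsStep_closed grid m n c.1 c.2 vis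
            (by rwa [show ((c.1 : Int), (c.2 : Int)) = c from rfl])
      obtain ⟨ih1, ih2, ih3⟩ := ih (bfsStep grid m n c.1 c.2 vis) (k + 1) hnd' hsound' hproc'
        (by omega) (by omega)
      rw [hloop]
      exact ⟨fun c' hc' => ih1 c' (bfsStep_mem grid m n c.1 c.2 vis hc'), ih2, ih3⟩

theorem doit_disjoint_alt_char (grid : List (List Int))
    (hm : 1 ≤ (grid.length : Int))
    (hn : 1 ≤ (((PySem.List.pyGet? grid 0).getD []).length : Int)) :
    doit_disjoint_alt grid = true ↔
      ReachG grid (grid.length : Int) (((PySem.List.pyGet? grid 0).getD []).length : Int)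
        (0, 0) ((grid.length : Int) - 1, (((PySem.List.pyGet? grid 0).getD []).length : Int) - 1) := by
  unfold doit_disjoint_alt
  set m : Int := (grid.length : Int)
  set n : Int := (((PySem.List.pyGet? grid 0).getD []).length : Int)
  show decide ((m - 1, n - 1) ∈ bfsLoop grid m n (m.toNat * n.toNat) [(0, 0)] 0) = true ↔ _
  rw [decide_eq_true_iff]
  obtain ⟨hpre, hsound, hclosed⟩ := bfsLoop_spec grid m n (m.toNat * n.toNat) [(0, 0)] 0
    (List.nodup_singleton _)
    (by
      intro c hc
      rw [List.mem_singleton] at hc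
      subst hc
      exact ⟨⟨le_refl 0, by omega, le_refl 0, by omega⟩, Relation.ReflTransGen.refl⟩)
    (by omega)
    (by simp)
    (by omega)
  constructor
  · intro hmem
    exact (hsound _ hmem).2
  · intro hreach
    have main : ∀ x, ReachG grid m n (0, 0) x →
        x ∈ bfsLoop grid m n (m.toNat * n.toNat) [(0, 0)] 0 := by
      intro x hx
      induction hx with
      | refl => exact hpre (0, 0) (List.mem_singleton_self _)
      | tail _ hadj ihr => exact hclosed _ ihr _ hadj
    exact main _ hreach

-- ===== bridge =====
theorem dirsB_units {v : Int} {d : Int × Int} (h : d ∈ dirsB v) :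
    d = (-1, 0) ∨ d = (1, 0) ∨ d = (0, -1) ∨ d = (0, 1) := by
  unfold dirsB at h
  split_ifs at h <;> simp_all <;> tauto

def Npred (grid : List (List Int)) (m n : Int) (u : Int × Int) : Prop :=
  (∃ c, u = (c.1 * 2, c.2 * 2) ∧ ReachG grid m n (0, 0) c) ∨
  (∃ c, ((c.1 * 2, c.2 * 2), u) ∈ Pgrid grid m n ∧ ReachG grid m n (0, 0) c)

theorem unit_resolve {i j c1 c2 : Int} {d d' : Int × Int}
    (hd : d = (-1, 0) ∨ d = (1, 0) ∨ d = (0, -1) ∨ d = (0, 1))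
    (hd' : d' = (-1, 0) ∨ d' = (1, 0) ∨ d' = (0, -1) ∨ d' = (0, 1))
    (hne : ¬(c1 = i ∧ c2 = j))
    (he1 : c1 * 2 + d'.1 = i * 2 + d.1) (he2 : c2 * 2 + d'.2 = j * 2 + d.2) :
    d'.1 = -d.1 ∧ d'.2 = -d.2 ∧ i = c1 + d'.1 ∧ j = c2 + d'.2 := by
  rcases hd with h | h | h | h <;> rcases hd' with h2 | h2 | h2 | h2 <;>
    subst h <;> subst h2 <;> simp_all <;> omega

theorem step_N {grid : List (List Int)} {m n : Int} {s t : Int × Int}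
    (hmem : (s, t) ∈ Pgrid grid m n) : Npred grid m n s ↔ Npred grid m n t := by
  obtain ⟨i, j, d, hi, hj, hd, hs, ht⟩ := mem_Pgrid.mp hmem
  have hdu := dirsB_units hd
  constructor
  · intro hN
    rcases hN with ⟨c, hcu, hcr⟩ | ⟨c, hcm, hcr⟩
    · -- s is the cell node of c = (i, j)
      have hc : c.1 = i ∧ c.2 = j := by
        rw [hs] at hcu
        have h1 := congrArg Prod.fst hcu
        have h2 := congrArg Prod.snd hcu
        simp at h1 h2
        omega
      refine Or.inr ⟨(i, j), ?_, ?_⟩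
      · show ((i * 2, j * 2), t) ∈ Pgrid grid m n
        rw [← hs]; exact hmem
      · have : c = (i, j) := Prod.ext_iff.mpr ⟨hc.1, hc.2⟩
        rwa [this] at hcr
    · -- s cannot be an edge node: parity
      exfalso
      obtain ⟨i', j', d', _, _, hd', hseq, hteq⟩ := mem_Pgrid.mp hcm
      have hdu' := dirsB_units hd'
      have h1 := congrArg Prod.fst hseq
      have h2 := congrArg Prod.snd hseq
      have h3 := congrArg Prod.fst (hs ▸ hteq : (i * 2, j * 2) = (i' * 2 + d'.1, j' * 2 + d'.2))
      have h4 := congrArg Prod.snd (hs ▸ hteq : (i * 2, j * 2) = (i' * 2 + d'.1, j' * 2 + d'.2))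
      simp at h1 h2 h3 h4
      rcases hdu' with h | h | h | h <;> subst h <;> simp_all <;> omega
  · intro hN
    rcases hN with ⟨c, hcu, hcr⟩ | ⟨c, hcm, hcr⟩
    · -- t cannot be a cell node: parity
      exfalso
      have h1 := congrArg Prod.fst (hcu.symm.trans ht)
      have h2 := congrArg Prod.snd (hcu.symm.trans ht)
      simp at h1 h2
      rcases hdu with h | h | h | h <;> subst h <;> simp_all <;> omega
    · obtain ⟨i', j', d', hi', hj', hd', hseq, hteq⟩ := mem_Pgrid.mp hcm
      have hdu' := dirsB_units hd'
      have hc1 : c.1 = i' := by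
        have := congrArg Prod.fst hseq; simp at this; omega
      have hc2 : c.2 = j' := by
        have := congrArg Prod.snd hseq; simp at this; omega
      subst hc1; subst hc2
      have he1 : c.1 * 2 + d'.1 = i * 2 + d.1 := by
        have := congrArg Prod.fst (hteq.symm.trans ht); simpa using this
      have he2 : c.2 * 2 + d'.2 = j * 2 + d.2 := by
        have := congrArg Prod.snd (hteq.symm.trans ht); simpa using this
      by_cases hceq : c.1 = i ∧ c.2 = j
      · refine Or.inl ⟨(i, j), hs, ?_⟩
        have : c = (i, j) := Prod.ext_iff.mpr ⟨hceq.1, hceq.2⟩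
        rwa [this] at hcr
      · obtain ⟨hr1, hr2, hr3, hr4⟩ := unit_resolve hdu hdu' hceq he1 he2
        have hadj : AdjG grid m n c (i, j) := by
          refine ⟨⟨hi'.1, hi'.2, hj'.1, hj'.2⟩, ⟨hi.1, hi.2, hj.1, hj.2⟩,
            d', hd', Prod.ext_iff.mpr ⟨hr3, hr4⟩, ?_⟩
          have : ((-d'.1 : Int), (-d'.2 : Int)) = d := by
            refine Prod.ext_iff.mpr ⟨?_, ?_⟩ <;> simp <;> omega
          rw [show ((i, j) : Int × Int).1 = i from rfl, show ((i, j) : Int × Int).2 = j from rfl,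
            this]
          exact hd
        exact Or.inl ⟨(i, j), hs, Relation.ReflTransGen.tail hcr hadj⟩

theorem eqvGen_iff_pred {α : Type} {R : α → α → Prop} {N : α → Prop}
    (h : ∀ s t, R s t → (N s ↔ N t)) {u v : α}
    (he : Relation.EqvGen R u v) : N u ↔ N v := by
  induction he with
  | rel _ _ hab => exact h _ _ hab
  | refl => exact Iff.rfl
  | symm _ _ _ ih => exact ih.symm
  | trans _ _ _ _ _ ih1 ih2 => exact ih1.trans ih2

theorem adj_eqv {grid : List (List Int)} {m n : Int} {c c' : Int × Int}
    (hadj : AdjG grid m n c c') :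
    Relation.EqvGen (fun s t => (s, t) ∈ Pgrid grid m n)
      (c.1 * 2, c.2 * 2) (c'.1 * 2, c'.2 * 2) := by
  obtain ⟨hbc, hbc', d, hd, he, hmut⟩ := hadj
  have p1 : ((c.1 * 2, c.2 * 2), (c.1 * 2 + d.1, c.2 * 2 + d.2)) ∈ Pgrid grid m n :=
    mem_Pgrid.mpr ⟨c.1, c.2, d, ⟨hbc.1, hbc.2.1⟩, ⟨hbc.2.2.1, hbc.2.2.2⟩, hd, rfl, rfl⟩
  have p2 : ((c'.1 * 2, c'.2 * 2), (c.1 * 2 + d.1, c.2 * 2 + d.2)) ∈ Pgrid grid m n := by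
    refine mem_Pgrid.mpr ⟨c'.1, c'.2, (-d.1, -d.2), ⟨hbc'.1, hbc'.2.1⟩,
      ⟨hbc'.2.2.1, hbc'.2.2.2⟩, hmut, rfl, ?_⟩
    have h1 : c'.1 = c.1 + d.1 := congrArg Prod.fst he
    have h2 : c'.2 = c.2 + d.2 := congrArg Prod.snd he
    refine Prod.ext_iff.mpr ⟨?_, ?_⟩ <;> simp [h1, h2] <;> ring
  exact Relation.EqvGen.trans _ _ _ (Relation.EqvGen.rel _ _ p1)
    (Relation.EqvGen.symm _ _ (Relation.EqvGen.rel _ _ p2))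

theorem reach_eqv {grid : List (List Int)} {m n : Int} {c : Int × Int}
    (h : ReachG grid m n (0, 0) c) :
    Relation.EqvGen (fun s t => (s, t) ∈ Pgrid grid m n) (0, 0) (c.1 * 2, c.2 * 2) := by
  induction h with
  | refl => exact Relation.EqvGen.refl _
  | tail _ hadj ih => exact Relation.EqvGen.trans _ _ _ ih (adj_eqv hadj)

theorem bridge (grid : List (List Int)) (m n : Int) (hm : 1 ≤ m) (hn : 1 ≤ n) :
    (Relation.EqvGen (fun s t => (s, t) ∈ Pgrid grid m n) (0, 0) (2 * m - 2, 2 * n - 2) ↔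
      ReachG grid m n (0, 0) (m - 1, n - 1)) := by
  constructor
  · intro he
    have hN := eqvGen_iff_pred (fun s t hst => step_N hst) he
    have hstart : Npred grid m n (0, 0) :=
      Or.inl ⟨(0, 0), by norm_num, Relation.ReflTransGen.refl⟩
    have htgt := hN.mp hstart
    rcases htgt with ⟨c, hcu, hcr⟩ | ⟨c, hcm, _⟩
    · have h1 := congrArg Prod.fst hcu
      have h2 := congrArg Prod.snd hcu
      simp at h1 h2
      have : c = (m - 1, n - 1) := Prod.ext_iff.mpr ⟨by omega, by omega⟩
      rwa [this] at hcr
    · exfalso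
      obtain ⟨i', j', d', _, _, hd', _, hteq⟩ := mem_Pgrid.mp hcm
      have hdu' := dirsB_units hd'
      have h3 := congrArg Prod.fst hteq
      have h4 := congrArg Prod.snd hteq
      simp at h3 h4
      rcases hdu' with h | h | h | h <;> subst h <;> simp_all <;> omega
  · intro hr
    have := reach_eqv hr
    rwa [show (((m - 1, n - 1) : Int × Int).1 * 2, ((m - 1, n - 1) : Int × Int).2 * 2)
        = ((2 * m - 2, 2 * n - 2) : Int × Int) from Prod.ext_iff.mpr ⟨by simp; ring, by simp; ring⟩]
      at this


-- ===== final assembly =====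
theorem pyGet0_headI {grid : List (List Int)} (hne : grid ≠ []) :
    (PySem.List.pyGet? grid 0).getD [] = grid.headI := by
  cases grid with
  | nil => exact absurd rfl hne
  | cons a l => simp [List.headI]

-- ===== VERDICT (by name: the statement is the Claim_ definition above) =====
theorem doit_disjoint_spec : Claim_equal_doit_disjoint := by
  intro grid _ hpre
  unfold Spec_doit_disjoint
  obtain ⟨hne, hrow, _⟩ := hpre
  have hm : 1 ≤ (grid.length : Int) := by
    have := List.length_pos_iff.mpr hne
    omega
  have hget : (PySem.List.pyGet? grid 0).getD [] = grid.headI := pyGet0_headI hne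
  have hn : 1 ≤ (((PySem.List.pyGet? grid 0).getD []).length : Int) := by
    rw [hget]
    have := List.length_pos_iff.mpr hrow
    omega
  have h1 := doit_disjoint_char grid
  have h2 := doit_disjoint_alt_char grid hm hn
  have h3 := bridge grid (grid.length : Int) (((PySem.List.pyGet? grid 0).getD []).length : Int)
    hm hn
  have hiff : doit_disjoint grid = true ↔ doit_disjoint_alt grid = true := by
    rw [h1, h2]
    exact h3
  cases hA : doit_disjoint grid <;> rw [hA] at hiff
  · simp only [Bool.false_eq_true, false_iff, Bool.not_eq_true] at hiff
    exact hiff.symm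
  · simp only [true_iff] at hiff
    exact hiff.symm
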